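-- pv_equiv track=rewrite | github.com/debdattasarkar/DSA | 1. Arrays/33. Chocolate Station/py_sol.py | getChocolateCost
-- ===== SOURCE A (Python) =====
-- def getChocolateCost(arr, price):
--     # code here
--     total_cost = arr[0]  # Chocolates to reach station 1 initially
--     balance = 0  # Geek starts with 0 chocolates
--
--     # Traverse from station 1 to end
--     for i in range(len(arr) - 1):
--         diff = arr[i] - arr[i + 1]
--
--         if diff < 0:
--             need = -diff
--             if balance >= need:
--                 balance -= need
--             else:
--                 total_cost += (need - balance)
--                 balance = 0
--         else:
--             balance += diff
--
--     return total_cost * price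
-- ===== SOURCE B (Python) =====
-- def getChocolateCost(arr, price):
--     # Running maximum: A's balance simulation always ends with total_cost = max(arr).
--     m = arr[0]
--     for x in arr[1:]:
--         if x > m:
--             m = x
--     return m * price
-- ===== Notes on version B (the rewrite author's own statement) =====
-- stated objective: simpler
-- what changed: Replaces the balance/total_cost simulation over adjacent differences by a single running-maximum pass (total_cost always equals the peak value seen so far), so B just returns max(arr) * price.
import Mathlib
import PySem

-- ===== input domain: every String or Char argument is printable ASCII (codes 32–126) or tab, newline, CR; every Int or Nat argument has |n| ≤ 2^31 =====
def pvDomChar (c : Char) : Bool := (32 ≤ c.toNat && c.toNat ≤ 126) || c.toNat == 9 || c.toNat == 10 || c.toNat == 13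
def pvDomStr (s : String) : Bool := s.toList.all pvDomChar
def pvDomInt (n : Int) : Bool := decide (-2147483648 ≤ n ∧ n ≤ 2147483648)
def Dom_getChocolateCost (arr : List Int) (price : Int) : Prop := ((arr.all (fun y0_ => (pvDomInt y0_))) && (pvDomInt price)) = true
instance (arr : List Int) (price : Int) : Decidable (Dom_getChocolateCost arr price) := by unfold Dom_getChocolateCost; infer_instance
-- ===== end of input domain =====

-- B replaces A's balance/total_cost simulation by a single running-maximum pass; objective: simpler.

-- ===== PORT A =====
-- A's loop over i in range(len(arr)-1) reads only the adjacent pair (arr[i], arr[i+1]);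
-- ported as the obvious structural recursion carrying the same (total_cost, balance) state.
def pvALoop : List Int → Int → Int → Int
  | x :: y :: rest, total, balance =>
      let diff := x - y
      if diff < 0 then
        let need := -diff
        if balance ≥ need then pvALoop (y :: rest) total (balance - need)
        else pvALoop (y :: rest) (total + (need - balance)) 0
      else pvALoop (y :: rest) total (balance + diff)
  | _, total, _ => total

def getChocolateCost (arr : List Int) (price : Int) : Int :=
  match arr with
  | [] => 0  -- arr[0] raises IndexError in Python; excluded by Pre_
  | x :: rest => pvALoop (x :: rest) x 0 * price

-- ===== PORT B =====
def pvBLoop : List Int → Int → Int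
  | [], m => m
  | x :: rest, m => pvBLoop rest (if x > m then x else m)

def getChocolateCost_alt (arr : List Int) (price : Int) : Int :=
  match arr with
  | [] => 0  -- arr[0] raises IndexError in Python; excluded by Pre_
  | x :: rest => pvBLoop rest x * price

-- ===== PRECONDITION & SPEC =====
-- A raises IndexError on the empty list (arr[0]); so does B. Pre_ excludes only that.
def Pre_getChocolateCost (arr : List Int) (price : Int) : Prop := arr ≠ []
instance (arr : List Int) (price : Int) : Decidable (Pre_getChocolateCost arr price) := by unfold Pre_getChocolateCost; infer_instance
def pvWitness_getChocolateCost : List Int × Int := ([6, 5, 1], 2)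

def Spec_getChocolateCost (arr : List Int) (price : Int) (out : Int) : Prop := out = getChocolateCost_alt arr price
instance (arr : List Int) (price : Int) (out : Int) : Decidable (Spec_getChocolateCost arr price out) := by unfold Spec_getChocolateCost; infer_instance

-- ===== CLAIM (what is proved, stated in full; the proofs are below) =====
def Claim_equal_getChocolateCost : Prop := ∀ (arr : List Int) (price : Int), Dom_getChocolateCost arr price → Pre_getChocolateCost arr price → Spec_getChocolateCost arr price (getChocolateCost arr price)

-- ===== LEMMAS AND PROOFS =====
-- Invariant of A's loop: with balance = total - x and x ≤ total, the loop computes the running maximum.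
theorem pvALoop_eq_bLoop (rest : List Int) : ∀ (x total balance : Int),
    balance = total - x → x ≤ total → pvALoop (x :: rest) total balance = pvBLoop rest total := by
  induction rest with
  | nil => intro x total balance _ _; simp [pvALoop, pvBLoop]
  | cons y rs ih =>
    intro x total balance hb hx
    simp only [pvALoop, pvBLoop]
    by_cases hd : x - y < 0
    · by_cases hge : balance ≥ -(x - y)
      · rw [if_pos hd, if_pos hge, ih y total (balance - -(x - y)) (by omega) (by omega)]
        rw [if_neg (by omega)]
      · rw [if_pos hd, if_neg hge,
            ih y (total + (-(x - y) - balance)) 0 (by omega) (by omega)]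
        have : (if y > total then y else total) = total + (-(x - y) - balance) := by
          rw [if_pos (by omega)]; omega
        rw [this]
    · rw [if_neg hd, ih y total (balance + (x - y)) (by omega) (by omega)]
      rw [if_neg (by omega)]

-- ===== VERDICT (by name: the statement is the Claim_ definition above) =====
theorem getChocolateCost_spec : Claim_equal_getChocolateCost := by
  intro arr price _ hpre
  unfold Spec_getChocolateCost
  match arr with
  | [] => exact absurd rfl hpre
  | x :: rest =>
    simp only [getChocolateCost, getChocolateCost_alt]
    rw [pvALoop_eq_bLoop rest x x 0 (by omega) le_rfl]
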